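-- pv_equiv track=rewrite | github.com/polirritmico/codesignal_solutions | Python/The Core/pairOfShoes.py | solution
-- ===== SOURCE A (Python) =====
-- def solution(founded_shoes: list[list[int]]) -> bool:
--     if len(founded_shoes) % 2 != 0:
--         return False
--
--     unpaired_shoes = {}
--     for shoe in founded_shoes:
--         # left shoes negative size, right shoes positive size
--         size = shoe[1] if shoe[0] == 1 else shoe[1] * -1
--         search_pair = size * -1
--         if search_pair in unpaired_shoes:
--             unpaired_shoes[search_pair] -= 1
--             if unpaired_shoes[search_pair] < 1:
--                 del unpaired_shoes[search_pair]
--         else: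
--             unpaired_shoes[size] = unpaired_shoes.get(size, 0) + 1
--     return len(unpaired_shoes) == 0
-- ===== SOURCE B (Python) =====
-- def solution(founded_shoes: list[list[int]]) -> bool:
--     if len(founded_shoes) % 2 != 0:
--         return False
--     sizes = [shoe[1] if shoe[0] == 1 else -shoe[1] for shoe in founded_shoes]
--     return all(sizes.count(s) == sizes.count(-s) for s in sizes)
-- ===== Notes on version B (the rewrite author's own statement) =====
-- stated objective: simpler
-- what changed: A's single-pass dict cancellation (decrement-and-delete of unpaired signed sizes) is replaced by a declarative two-stage formulation: materialize the list of signed sizes, then check that every size occurs as often as its negation; no dictionary and no incremental state at all.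
import Mathlib
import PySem

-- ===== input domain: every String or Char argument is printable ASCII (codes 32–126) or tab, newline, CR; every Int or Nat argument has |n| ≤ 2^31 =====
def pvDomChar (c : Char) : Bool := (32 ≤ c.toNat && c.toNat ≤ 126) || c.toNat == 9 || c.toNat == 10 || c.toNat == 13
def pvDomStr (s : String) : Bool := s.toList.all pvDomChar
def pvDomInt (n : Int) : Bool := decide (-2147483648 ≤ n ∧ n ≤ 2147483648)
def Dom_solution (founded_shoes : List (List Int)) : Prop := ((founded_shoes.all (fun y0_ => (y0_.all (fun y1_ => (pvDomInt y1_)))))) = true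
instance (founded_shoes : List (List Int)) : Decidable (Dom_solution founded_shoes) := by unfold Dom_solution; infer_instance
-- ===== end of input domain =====

set_option maxHeartbeats 1000000


-- B replaces A's single-pass dict cancellation by a stateless two-stage formulation:
-- materialize the signed sizes, then check count(s) == count(-s) for every size (objective: simpler).

-- ===== PORT A =====
def solution (founded_shoes : List (List Int)) : Bool :=
  if founded_shoes.length % 2 != 0 then false
  else
    let unpaired := founded_shoes.foldl (fun (d : PySem.Dict Int Int) shoe =>
      let size : Int := if (PySem.List.pyGet? shoe 0).getD 0 == 1
                        then (PySem.List.pyGet? shoe 1).getD 0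
                        else (PySem.List.pyGet? shoe 1).getD 0 * (-1)
      let searchPair := size * (-1)
      if d.contains searchPair then
        -- unpaired_shoes[search_pair] -= 1 (key present since contains); del if < 1
        let d2 := d.modify searchPair 0 (fun v => v - 1)
        if d2.getD searchPair 0 < 1 then d2.erase searchPair else d2
      else d.insert size (d.getD size 0 + 1)) PySem.Dict.empty
    unpaired.size == 0

-- ===== PORT B =====
def solution_alt (founded_shoes : List (List Int)) : Bool :=
  if founded_shoes.length % 2 != 0 then false
  else
    let sizes : List Int := founded_shoes.map (fun shoe =>
      if (PySem.List.pyGet? shoe 0).getD 0 == 1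
      then (PySem.List.pyGet? shoe 1).getD 0
      else -((PySem.List.pyGet? shoe 1).getD 0))
    sizes.all (fun s => sizes.count s == sizes.count (-s))

-- ===== PRECONDITION & SPEC =====
-- Pre_ excludes exactly the inputs where Python A raises IndexError: an even-length list
-- containing a shoe with fewer than 2 entries (shoe[0]/shoe[1] out of range); B raises there too.
def Pre_solution (founded_shoes : List (List Int)) : Prop :=
  founded_shoes.length % 2 = 1 ∨ ∀ shoe ∈ founded_shoes, 2 ≤ shoe.length
instance (founded_shoes : List (List Int)) : Decidable (Pre_solution founded_shoes) := by unfold Pre_solution; infer_instance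
def pvWitness_solution : List (List Int) := [[1, 5], [0, 5]]

def Spec_solution (founded_shoes : List (List Int)) (out : Bool) : Prop := out = solution_alt founded_shoes
instance (founded_shoes : List (List Int)) (out : Bool) : Decidable (Spec_solution founded_shoes out) := by unfold Spec_solution; infer_instance

-- ===== CLAIM (what is proved, stated in full; the proofs are below) =====
def Claim_equal_solution : Prop := ∀ (founded_shoes : List (List Int)), Dom_solution founded_shoes → Pre_solution founded_shoes → Spec_solution founded_shoes (solution founded_shoes)

-- ===== LEMMAS AND PROOFS =====

-- the signed size of a shoe, as both ports compute it
def pvSize (shoe : List Int) : Int :=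
  if (PySem.List.pyGet? shoe 0).getD 0 == 1
  then (PySem.List.pyGet? shoe 1).getD 0
  else (PySem.List.pyGet? shoe 1).getD 0 * (-1)

def pvStepA (d : PySem.Dict Int Int) (a : Int) : PySem.Dict Int Int :=
  if d.contains (-a) then
    let d2 := d.modify (-a) 0 (fun v => v - 1)
    if d2.getD (-a) 0 < 1 then d2.erase (-a) else d2
  else d.insert a (d.getD a 0 + 1)

def pvCnt (xs : List Int) (s : Int) : Int := (xs.count s : Int)

def pvBal (xs : List Int) (s : Int) : Int :=
  if s = 0 then pvCnt xs 0 % 2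
  else if pvCnt xs s - pvCnt xs (-s) ≤ 0 then 0 else pvCnt xs s - pvCnt xs (-s)

theorem pv_get?_erase {ν : Type} (d : PySem.Dict Int ν) (k k' : Int) :
    (d.erase k).get? k' = if k' = k then none else d.get? k' := by
  obtain ⟨items⟩ := d
  simp only [PySem.Dict.erase, PySem.Dict.get?, List.find?_filter]
  by_cases hkk : k' = k
  · subst hkk
    rw [List.find?_eq_none.mpr ?_]
    · simp
    · intro x _ hx; simp at hx
  · have : (fun (a : Int × ν) => decide ((!a.1 == k) = true ∧ (a.1 == k') = true))
        = (fun (a : Int × ν) => a.1 == k') := by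
      funext a; by_cases h : a.1 = k' <;> simp [h]; omega
    rw [this]; simp [hkk]

theorem pv_contains_erase {ν : Type} (d : PySem.Dict Int ν) (k k' : Int) :
    (d.erase k).contains k' = if k' = k then false else d.contains k' := by
  obtain ⟨items⟩ := d
  simp only [PySem.Dict.erase, PySem.Dict.contains, List.any_filter]
  by_cases hkk : k' = k
  · subst hkk; simp
  · have : (fun (a : Int × ν) => (!a.1 == k) && (a.1 == k'))
        = (fun (a : Int × ν) => a.1 == k') := by
      funext a; by_cases h : a.1 = k' <;> simp [h]; omega
    rw [this]; simp [hkk]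

theorem pv_getD_erase (d : PySem.Dict Int Int) (k k' v0 : Int) :
    (d.erase k).getD k' v0 = if k' = k then v0 else d.getD k' v0 := by
  simp only [PySem.Dict.getD_eq_get?_getD, pv_get?_erase]
  split <;> simp

theorem pv_nodup_keys_erase {ν : Type} (d : PySem.Dict Int ν) (k : Int)
    (h : d.keys.Nodup) : (d.erase k).keys.Nodup := by
  obtain ⟨items⟩ := d
  exact List.Nodup.sublist (List.Sublist.map _ List.filter_sublist) h

theorem pv_nodup_keys_modify (d : PySem.Dict Int Int) (k d0 : Int) (f : Int → Int)
    (h : d.keys.Nodup) : (d.modify k d0 f).keys.Nodup :=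
  PySem.Dict.nodup_keys_insert d k _ h

theorem pv_cnt_append (xs : List Int) (a s : Int) :
    pvCnt (xs ++ [a]) s = pvCnt xs s + if a = s then 1 else 0 := by
  unfold pvCnt
  rw [List.count_append, List.count_singleton]
  by_cases h : a = s <;> simp [h]

theorem pv_bal_nonneg (xs : List Int) (s : Int) : 0 ≤ pvBal xs s := by
  unfold pvBal; split_ifs <;> omega

theorem pv_bal_zero (xs : List Int) : pvBal xs 0 = pvCnt xs 0 % 2 := by
  unfold pvBal; rw [if_pos rfl]

theorem pv_bal_unfold (xs : List Int) (s : Int) (h : s ≠ 0) :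
    pvBal xs s = if pvCnt xs s - pvCnt xs (-s) ≤ 0 then 0 else pvCnt xs s - pvCnt xs (-s) := by
  unfold pvBal; rw [if_neg h]

theorem pv_bal_append_ne (xs : List Int) (a s : Int) (h1 : s ≠ a) (h2 : s ≠ -a) :
    pvBal (xs ++ [a]) s = pvBal xs s := by
  have e1 : pvCnt (xs ++ [a]) s = pvCnt xs s := by
    rw [pv_cnt_append, if_neg (by omega : ¬ a = s)]; ring
  have e2 : pvCnt (xs ++ [a]) (-s) = pvCnt xs (-s) := by
    rw [pv_cnt_append, if_neg (by omega : ¬ a = -s)]; ring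
  by_cases hs : s = 0
  · subst hs; rw [pv_bal_zero, pv_bal_zero, e1]
  · rw [pv_bal_unfold _ _ hs, pv_bal_unfold _ _ hs, e1, e2]

theorem pv_bal_append_self (xs : List Int) (a : Int) (ha : a ≠ 0) :
    pvBal (xs ++ [a]) a
      = if pvCnt xs a + 1 - pvCnt xs (-a) ≤ 0 then 0 else pvCnt xs a + 1 - pvCnt xs (-a) := by
  rw [pv_bal_unfold _ _ ha, pv_cnt_append, pv_cnt_append,
      if_pos rfl, if_neg (by omega : ¬ a = -a)]
  ring_nf

theorem pv_bal_append_negself (xs : List Int) (a : Int) (ha : a ≠ 0) :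
    pvBal (xs ++ [a]) (-a)
      = if pvCnt xs (-a) - (pvCnt xs a + 1) ≤ 0 then 0
        else pvCnt xs (-a) - (pvCnt xs a + 1) := by
  rw [pv_bal_unfold _ _ (by omega : (-a : Int) ≠ 0), pv_cnt_append, pv_cnt_append, neg_neg,
      if_pos rfl, if_neg (by omega : ¬ a = -a)]
  ring_nf

theorem pv_bal_append_zero (xs : List Int) : pvBal (xs ++ [0]) 0 = (pvCnt xs 0 + 1) % 2 := by
  rw [pv_bal_zero, pv_cnt_append, if_pos rfl]

theorem pvA_inv (xs : List Int) :
    (xs.foldl pvStepA PySem.Dict.empty).keys.Nodup ∧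
    (∀ s, (xs.foldl pvStepA PySem.Dict.empty).getD s 0 = pvBal xs s) ∧
    (∀ s, (xs.foldl pvStepA PySem.Dict.empty).contains s = decide (pvBal xs s ≠ 0)) := by
  induction xs using List.reverseRecOn with
  | nil =>
    refine ⟨PySem.Dict.nodup_keys_empty, fun s => ?_, fun s => ?_⟩ <;>
      simp [PySem.Dict.getD_empty, PySem.Dict.contains_empty, pvBal, pvCnt]
  | append_singleton xs a ih =>
    obtain ⟨hnd, hget, hcon⟩ := ih
    rw [List.foldl_append]
    set d := xs.foldl pvStepA PySem.Dict.empty with hd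
    simp only [List.foldl_cons, List.foldl_nil]
    unfold pvStepA
    have hgm : ∀ s, (d.modify (-a) 0 (fun v => v - 1)).getD s 0
        = if s = -a then pvBal xs (-a) - 1 else pvBal xs s := by
      intro s; rw [PySem.Dict.getD_modify, hget, hget]
    by_cases hca : d.contains (-a) = true
    · rw [if_pos hca]
      have hbna : pvBal xs (-a) ≠ 0 := by
        have h := hcon (-a); rw [hca] at h
        intro h0; rw [h0] at h; simp at h
      simp only []
      by_cases hlt : (d.modify (-a) 0 (fun v => v - 1)).getD (-a) 0 < 1
      · -- erase branch
        rw [if_pos hlt]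
        rw [hgm, if_pos rfl] at hlt
        have hb1 : pvBal xs (-a) = 1 := by have := pv_bal_nonneg xs (-a); omega
        refine ⟨pv_nodup_keys_erase _ _ (pv_nodup_keys_modify _ _ _ _ hnd), fun s => ?_, fun s => ?_⟩
        · rw [pv_getD_erase, hgm]
          by_cases h0 : a = 0
          · subst h0
            rw [neg_zero, pv_bal_zero] at hb1
            by_cases hs : s = 0
            · subst hs
              simp only [neg_zero, if_true]
              rw [pv_bal_append_zero]
              omega
            · simp only [neg_zero, if_neg hs, pv_bal_append_ne xs 0 s hs hs]
          · have hd1 : pvCnt xs (-a) = pvCnt xs a + 1 := by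
              rw [pv_bal_unfold _ _ (by omega : (-a : Int) ≠ 0), neg_neg] at hb1
              split_ifs at hb1 <;> omega
            by_cases h2 : s = -a
            · subst h2
              rw [if_pos rfl, pv_bal_append_negself xs a h0, if_pos (by omega)]
            · rw [if_neg h2, if_neg h2]
              by_cases h1 : s = a
              · subst h1
                rw [pv_bal_append_self xs s h0, if_pos (by omega),
                    pv_bal_unfold _ _ h0, if_pos (by omega)]
              · rw [pv_bal_append_ne xs a s h1 h2]
        · rw [pv_contains_erase, PySem.Dict.contains_modify, hcon]
          by_cases h0 : a = 0
          · subst h0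
            rw [neg_zero, pv_bal_zero] at hb1
            by_cases hs : s = 0
            · subst hs
              simp only [neg_zero, if_true]
              rw [pv_bal_append_zero]
              have : (pvCnt xs 0 + 1) % 2 = 0 := by omega
              rw [this]; simp
            · simp only [neg_zero, if_neg hs, pv_bal_append_ne xs 0 s hs hs]
              simp [hs]
          · have hd1 : pvCnt xs (-a) = pvCnt xs a + 1 := by
              rw [pv_bal_unfold _ _ (by omega : (-a : Int) ≠ 0), neg_neg] at hb1
              split_ifs at hb1 <;> omega
            by_cases h2 : s = -a
            · subst h2
              rw [if_pos rfl, pv_bal_append_negself xs a h0, if_pos (by omega)]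
              simp
            · rw [if_neg h2]
              have hbeq : (s == -a) = false := by simp [h2]
              rw [hbeq, Bool.false_or]
              by_cases h1 : s = a
              · subst h1
                rw [pv_bal_append_self xs s h0, if_pos (by omega),
                    pv_bal_unfold _ _ h0, if_pos (by omega)]
              · rw [pv_bal_append_ne xs a s h1 h2]
      · -- modify-kept branch
        rw [if_neg hlt]
        rw [hgm, if_pos rfl] at hlt
        have hb2 : 2 ≤ pvBal xs (-a) := by have := pv_bal_nonneg xs (-a); omega
        have h0 : a ≠ 0 := by
          intro h; subst h
          rw [neg_zero, pv_bal_zero] at hb2; omega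
        have hd2 : 2 ≤ pvCnt xs (-a) - pvCnt xs a := by
          rw [pv_bal_unfold _ _ (by omega : (-a : Int) ≠ 0), neg_neg] at hb2
          split_ifs at hb2 <;> omega
        have hb2' : pvBal xs (-a) = pvCnt xs (-a) - pvCnt xs a := by
          rw [pv_bal_unfold _ _ (by omega : (-a : Int) ≠ 0), neg_neg, if_neg (by omega)]
        refine ⟨pv_nodup_keys_modify _ _ _ _ hnd, fun s => ?_, fun s => ?_⟩
        · rw [hgm]
          by_cases h2 : s = -a
          · subst h2
            rw [if_pos rfl, pv_bal_append_negself xs a h0, if_neg (by omega), hb2']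
            ring
          · rw [if_neg h2]
            by_cases h1 : s = a
            · subst h1
              rw [pv_bal_append_self xs s h0, if_pos (by omega),
                  pv_bal_unfold _ _ h0, if_pos (by omega)]
            · rw [pv_bal_append_ne xs a s h1 h2]
        · rw [PySem.Dict.contains_modify, hcon]
          by_cases h2 : s = -a
          · subst h2
            rw [pv_bal_append_negself xs a h0, if_neg (by omega)]
            have : ((-a : Int) == -a) = true := by simp
            rw [this]
            simp only [Bool.true_or]
            have : pvCnt xs (-a) - (pvCnt xs a + 1) ≠ 0 := by omega
            simp [this]
          · have hbeq : (s == -a) = false := by simp [h2]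
            rw [hbeq, Bool.false_or]
            by_cases h1 : s = a
            · subst h1
              rw [pv_bal_append_self xs s h0, if_pos (by omega),
                  pv_bal_unfold _ _ h0, if_pos (by omega)]
            · rw [pv_bal_append_ne xs a s h1 h2]
    · -- insert branch
      rw [if_neg hca]
      have hbz : pvBal xs (-a) = 0 := by
        have h := hcon (-a); rw [Bool.not_eq_true] at hca; rw [hca] at h
        by_contra hne; rw [decide_eq_true hne] at h; simp at h
      refine ⟨PySem.Dict.nodup_keys_insert _ _ _ hnd, fun s => ?_, fun s => ?_⟩
      · rw [PySem.Dict.getD_insert, hget, hget]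
        by_cases h0 : a = 0
        · subst h0
          rw [neg_zero, pv_bal_zero] at hbz
          by_cases hs : s = 0
          · subst hs
            rw [if_pos rfl, pv_bal_append_zero, pv_bal_zero]
            omega
          · rw [if_neg hs, pv_bal_append_ne xs 0 s hs (by simpa using hs)]
        · have hd0 : pvCnt xs (-a) ≤ pvCnt xs a := by
            rw [pv_bal_unfold _ _ (by omega : (-a : Int) ≠ 0), neg_neg] at hbz
            split_ifs at hbz <;> omega
          by_cases h1 : s = a
          · subst h1
            rw [if_pos rfl, pv_bal_append_self xs s h0, if_neg (by omega),
                pv_bal_unfold _ _ h0]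
            split_ifs <;> omega
          · rw [if_neg h1]
            by_cases h2 : s = -a
            · subst h2
              rw [pv_bal_append_negself xs a h0, if_pos (by omega), hbz]
            · rw [pv_bal_append_ne xs a s h1 h2]
      · rw [PySem.Dict.contains_insert, hcon]
        by_cases h0 : a = 0
        · subst h0
          rw [neg_zero, pv_bal_zero] at hbz
          by_cases hs : s = 0
          · subst hs
            have : ((0 : Int) == 0) = true := by simp
            rw [this, Bool.true_or, pv_bal_append_zero]
            have : (pvCnt xs 0 + 1) % 2 = 1 := by omega
            simp [this]
          · have hbeq : (s == (0 : Int)) = false := by simp [hs]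
            rw [hbeq, Bool.false_or, pv_bal_append_ne xs 0 s hs (by simpa using hs)]
        · have hd0 : pvCnt xs (-a) ≤ pvCnt xs a := by
            rw [pv_bal_unfold _ _ (by omega : (-a : Int) ≠ 0), neg_neg] at hbz
            split_ifs at hbz <;> omega
          by_cases h1 : s = a
          · subst h1
            have : (s == s) = true := by simp
            rw [this, Bool.true_or, pv_bal_append_self xs s h0, if_neg (by omega)]
            have : pvCnt xs s + 1 - pvCnt xs (-s) ≠ 0 := by omega
            simp [this]
          · have hbeq : (s == a) = false := by simp [h1]
            rw [hbeq, Bool.false_or]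
            by_cases h2 : s = -a
            · subst h2
              rw [pv_bal_append_negself xs a h0, if_pos (by omega), hbz]
            · rw [pv_bal_append_ne xs a s h1 h2]

theorem pv_size_zero_iff (d : PySem.Dict Int Int) :
    ((d.size == 0) = true) ↔ ∀ s, d.contains s = false := by
  obtain ⟨items⟩ := d
  cases items with
  | nil => simp [PySem.Dict.size, PySem.Dict.contains]
  | cons p t =>
    simp only [PySem.Dict.size, PySem.Dict.contains]
    constructor
    · intro h; simp at h
    · intro h; have := h p.1; simp at this

-- partition of the length into zero / negative / positive elements
theorem pv_len_split (xs : List Int) :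
    xs.length = xs.count 0 + xs.countP (fun x => decide (x < 0)) + xs.countP (fun x => decide (0 < x)) := by
  induction xs with
  | nil => simp
  | cons x t ih =>
    simp only [List.length_cons, List.count_cons, List.countP_cons, ih]
    rcases lt_trichotomy x 0 with h | h | h
    · have h1 : (x == (0 : Int)) = false := by simp; omega
      simp [h1, h, not_lt_of_gt h]
      omega
    · subst h
      simp
      omega
    · have h1 : (x == (0 : Int)) = false := by simp; omega
      simp [h1, h, not_lt_of_gt h]
      omega

theorem pv_cnt0_even (xs : List Int) (hev : xs.length % 2 = 0)
    (h : ∀ s, pvCnt xs s = pvCnt xs (-s)) : pvCnt xs 0 % 2 = 0 := by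
  have hcount : ∀ s : Int, xs.count s = xs.count (-s) := by
    intro s; have := h s; unfold pvCnt at this; exact_mod_cast this
  have hM : ∀ s : Int, (xs.map (fun x => -x)).count s = xs.count s := by
    intro s
    have e : ((fun (x : Int) => -x) (-s)) = s := by ring
    calc (xs.map (fun x => -x)).count s
        = (xs.map (fun x => -x)).count ((fun (x : Int) => -x) (-s)) := by rw [e]
      _ = xs.count (-s) := List.count_map_of_injective _ _ neg_injective _
      _ = xs.count s := by rw [← hcount s]
  have hperm : (xs.map (fun x => -x)).Perm xs := List.perm_iff_count.mpr hM
  have hcp : xs.countP (fun x => decide (x < 0)) = xs.countP (fun x => decide (0 < x)) := by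
    have h1 := hperm.countP_eq (fun x => decide (x < 0))
    rw [List.countP_map] at h1
    have e : ((fun (x : Int) => decide (x < 0)) ∘ (fun (x : Int) => -x))
        = fun (x : Int) => decide (0 < x) := by
      funext x; simp only [Function.comp_apply]; by_cases hx : 0 < x <;> simp [hx]
    rw [e] at h1
    exact h1.symm
  have hs := pv_len_split xs
  unfold pvCnt
  omega

-- upgrade the membership-bounded count symmetry to all s
theorem pv_cnt_all (xs : List Int) (h : ∀ s ∈ xs, pvCnt xs s = pvCnt xs (-s)) :
    ∀ s, pvCnt xs s = pvCnt xs (-s) := by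
  intro s
  by_cases h1 : s ∈ xs
  · exact h s h1
  · by_cases h2 : -s ∈ xs
    · have := h (-s) h2; rw [neg_neg] at this; exact this.symm
    · unfold pvCnt
      rw [List.count_eq_zero_of_not_mem h1, List.count_eq_zero_of_not_mem h2]

theorem pv_bal_iff (xs : List Int) (hev : xs.length % 2 = 0) :
    (∀ s, pvBal xs s = 0) ↔ ∀ s ∈ xs, pvCnt xs s = pvCnt xs (-s) := by
  constructor
  · intro h s _
    by_cases hs0 : s = 0
    · subst hs0; rw [neg_zero]
    · have h1 := h s
      have h2 := h (-s)
      rw [pv_bal_unfold _ _ hs0] at h1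
      rw [pv_bal_unfold _ _ (neg_ne_zero.mpr hs0), neg_neg] at h2
      split_ifs at h1 h2 <;> omega
  · intro h s
    have hall := pv_cnt_all xs h
    by_cases hs0 : s = 0
    · subst hs0; rw [pv_bal_zero]; exact pv_cnt0_even xs hev hall
    · rw [pv_bal_unfold _ _ hs0]
      have := hall s
      split_ifs <;> omega

theorem pvA_eq (xs : List Int) (hev : xs.length % 2 = 0) :
    ((xs.foldl pvStepA PySem.Dict.empty).size == 0)
      = xs.all (fun s => xs.count s == xs.count (-s)) := by
  obtain ⟨hnd, hget, hcon⟩ := pvA_inv xs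
  by_cases h : ∀ s ∈ xs, pvCnt xs s = pvCnt xs (-s)
  · have hbal := (pv_bal_iff xs hev).mpr h
    have hl : ((xs.foldl pvStepA PySem.Dict.empty).size == 0) = true :=
      (pv_size_zero_iff _).mpr (fun s => by rw [hcon s, hbal s]; simp)
    have hr : xs.all (fun s => xs.count s == xs.count (-s)) = true := by
      rw [List.all_eq_true]
      intro x hx
      have := h x hx
      unfold pvCnt at this
      exact beq_iff_eq.mpr (by exact_mod_cast this)
    rw [hl, hr]
  · have hbal : ¬ ∀ s, pvBal xs s = 0 := fun hh => h ((pv_bal_iff xs hev).mp hh)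
    have hl : ((xs.foldl pvStepA PySem.Dict.empty).size == 0) = false := by
      by_contra hb
      rw [Bool.not_eq_false] at hb
      refine hbal fun s => ?_
      have hc := ((pv_size_zero_iff _).mp hb) s
      rw [hcon s] at hc
      simpa using hc
    have hr : xs.all (fun s => xs.count s == xs.count (-s)) = false := by
      by_contra hb
      rw [Bool.not_eq_false, List.all_eq_true] at hb
      refine h fun s hs => ?_
      have := hb s hs
      unfold pvCnt
      exact_mod_cast beq_iff_eq.mp this
    rw [hl, hr]

-- ===== VERDICT (by name: the statement is the Claim_ definition above) =====
theorem solution_spec : Claim_equal_solution := by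
  unfold Claim_equal_solution
  intro fs _ _
  unfold Spec_solution solution solution_alt
  by_cases hl : fs.length % 2 = 0
  · have hg : (fs.length % 2 != 0) = false := by simp [hl]
    rw [hg]
    simp only [Bool.false_eq_true, if_false]
    have hbodyA : (fun (d : PySem.Dict Int Int) (shoe : List Int) =>
        let size : Int := if (PySem.List.pyGet? shoe 0).getD 0 == 1
                          then (PySem.List.pyGet? shoe 1).getD 0
                          else (PySem.List.pyGet? shoe 1).getD 0 * (-1)
        let searchPair := size * (-1)
        if d.contains searchPair then
          let d2 := d.modify searchPair 0 (fun v => v - 1)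
          if d2.getD searchPair 0 < 1 then d2.erase searchPair else d2
        else d.insert size (d.getD size 0 + 1))
        = (fun d shoe => pvStepA d (pvSize shoe)) := by
      funext d shoe
      simp only [pvStepA, pvSize, mul_neg_one]
    have hbodyB : (fun (shoe : List Int) =>
        if (PySem.List.pyGet? shoe 0).getD 0 == 1
        then (PySem.List.pyGet? shoe 1).getD 0
        else -((PySem.List.pyGet? shoe 1).getD 0)) = pvSize := by
      funext shoe
      simp only [pvSize, mul_neg_one]
    rw [hbodyA, hbodyB, ← List.foldl_map]
    exact pvA_eq (fs.map pvSize) (by simpa using hl)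
  · have hg : (fs.length % 2 != 0) = true := by simpa using hl
    rw [hg]
    rfl
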